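-- pv_equiv track=rewrite | github.com/Pikurrot/cvc-place | whoisin_check.py | real_name_present
-- ===== SOURCE A (Python) =====
-- def real_name_present(real_name: str, options_text_lower: list[str]) -> bool:
--     parts = [p for p in real_name.lower().split() if p]
--     if not parts:
--         return False
--     for line in options_text_lower:
--         if all(part in line for part in parts):
--             return True
--     return False
-- ===== SOURCE B (Python) =====
-- def real_name_present(real_name: str, options_text_lower: list[str]) -> bool:
--     parts = [p for p in real_name.lower().split() if p]
--     if not parts:
--         return False
--     candidates = options_text_lower
--     for part in parts:
--         candidates = [line for line in candidates if part in line]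
--         if not candidates:
--             return False
--     return bool(candidates)
-- ===== Notes on version B (the rewrite author's own statement) =====
-- stated objective: faster
-- what changed: Inverts the loop nesting: instead of testing every line against all name parts with a per-line generator, B keeps a shrinking candidate-line list, filtering it by one part at a time and returning False as soon as no candidates remain.
import Mathlib
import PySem

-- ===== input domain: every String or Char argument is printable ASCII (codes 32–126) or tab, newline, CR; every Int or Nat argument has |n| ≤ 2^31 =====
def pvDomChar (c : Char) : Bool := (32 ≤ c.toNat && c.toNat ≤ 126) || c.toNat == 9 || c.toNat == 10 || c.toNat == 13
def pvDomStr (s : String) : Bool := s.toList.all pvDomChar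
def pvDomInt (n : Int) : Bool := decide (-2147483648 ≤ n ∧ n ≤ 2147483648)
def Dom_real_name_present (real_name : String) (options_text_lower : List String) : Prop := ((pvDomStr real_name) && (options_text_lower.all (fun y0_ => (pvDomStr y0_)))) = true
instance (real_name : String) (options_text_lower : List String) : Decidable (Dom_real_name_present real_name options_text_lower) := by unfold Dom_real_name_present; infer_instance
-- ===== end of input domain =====

-- B inverts the loop nesting: a shrinking candidate-line list filtered by one name part at a time
-- (alternative decomposition, same worst-case cost).

-- ===== PORT A =====
-- for line in options_text_lower: if all(part in line for part in parts): return True / return False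
def real_name_present (real_name : String) (options_text_lower : List String) : Bool :=
  let parts := (PySem.Str.split₀ (PySem.Str.lower real_name)).filter (fun p => !(p == ""))
  if parts.isEmpty then false
  else options_text_lower.any (fun line => parts.all (fun part => PySem.Str.isIn part line))

-- ===== PORT B =====
-- the 'for part in parts' loop over the shrinking candidate list, with its early return
def pvFilterLoop (parts : List String) (candidates : List String) : Bool :=
  match parts with
  | [] => !candidates.isEmpty
  | part :: rest =>
    let candidates' := candidates.filter (fun line => PySem.Str.isIn part line)
    if candidates'.isEmpty then false else pvFilterLoop rest candidates'

def real_name_present_alt (real_name : String) (options_text_lower : List String) : Bool :=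
  let parts := (PySem.Str.split₀ (PySem.Str.lower real_name)).filter (fun p => !(p == ""))
  if parts.isEmpty then false
  else pvFilterLoop parts options_text_lower

-- ===== PRECONDITION & SPEC =====
def Spec_real_name_present (real_name : String) (options_text_lower : List String) (out : Bool) : Prop := out = real_name_present_alt real_name options_text_lower
instance (real_name : String) (options_text_lower : List String) (out : Bool) : Decidable (Spec_real_name_present real_name options_text_lower out) := by unfold Spec_real_name_present; infer_instance

-- ===== CLAIM (what is proved, stated in full; the proofs are below) =====
def Claim_equal_real_name_present : Prop := ∀ (real_name : String) (options_text_lower : List String), Dom_real_name_present real_name options_text_lower → Spec_real_name_present real_name options_text_lower (real_name_present real_name options_text_lower)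

-- ===== LEMMAS AND PROOFS =====

-- ===== VERDICT (by name: the statement is the Claim_ definition above) =====
lemma pvFilterLoop_eq_any (parts candidates : List String) :
    pvFilterLoop parts candidates
      = candidates.any (fun line => parts.all (fun part => PySem.Str.isIn part line)) := by
  induction parts generalizing candidates with
  | nil => cases candidates <;> simp [pvFilterLoop]
  | cons part rest ih =>
    simp only [pvFilterLoop, List.all_cons, ← List.any_filter]
    by_cases h : (candidates.filter (fun line => PySem.Str.isIn part line)).isEmpty
    · rw [List.isEmpty_iff] at h
      rw [h]
      rfl
    · rw [if_neg h]
      exact ih _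

theorem real_name_present_spec : Claim_equal_real_name_present := by
  intro real_name options_text_lower _
  unfold Spec_real_name_present real_name_present real_name_present_alt
  simp only [pvFilterLoop_eq_any]
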